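-- pv_equiv track=rewrite | github.com/roeyogen/FSTMA-roomba | meta_joint_solver.py | get_action_per_timestep
-- ===== SOURCE A (Python) =====
-- def get_action_per_timestep(action_paths):
--
--     actions_list = []
--
--     lengths = [len(actions) for actions in action_paths.values()]
--
--     for i in range(max(lengths)):
--         joint_action = []
--         for agent_actions in action_paths.values():
--             to_append = agent_actions[i] if i < len(agent_actions) else 'STAY'
--             joint_action.append(to_append)
--
--         actions_list.append(joint_action)
--
--     return actions_list
-- ===== SOURCE B (Python) =====
-- def get_action_per_timestep(action_paths):
--     vals = list(action_paths.values())
--     max_len = max(len(a) for a in vals)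
--     n_agents = len(vals)
--     actions_list = [['STAY'] * n_agents for _ in range(max_len)]
--     for col, agent_actions in enumerate(vals):
--         for row, action in enumerate(agent_actions):
--             actions_list[row][col] = action
--     return actions_list
-- ===== Notes on version B (the rewrite author's own statement) =====
-- stated objective: alternative
-- what changed: B preallocates a max_len x n_agents grid pre-filled with 'STAY' and scatters each agent's path column-wise into it, instead of A's gathering of one joint-action row per timestep with a per-element bounds check.
import Mathlib
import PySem

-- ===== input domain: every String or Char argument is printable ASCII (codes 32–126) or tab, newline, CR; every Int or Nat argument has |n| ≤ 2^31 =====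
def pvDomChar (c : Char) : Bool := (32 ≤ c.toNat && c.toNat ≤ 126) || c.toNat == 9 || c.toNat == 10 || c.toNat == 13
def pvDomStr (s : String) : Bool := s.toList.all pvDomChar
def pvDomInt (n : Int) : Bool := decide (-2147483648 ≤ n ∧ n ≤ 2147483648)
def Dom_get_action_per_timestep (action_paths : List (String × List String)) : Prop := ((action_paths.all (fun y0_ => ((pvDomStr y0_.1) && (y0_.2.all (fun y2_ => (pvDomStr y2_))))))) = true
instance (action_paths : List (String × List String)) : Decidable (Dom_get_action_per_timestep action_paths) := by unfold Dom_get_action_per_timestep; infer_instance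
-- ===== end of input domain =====

-- B replaces A's per-timestep gathering (with a bounds check on every element) by a
-- pre-padded max_len × n_agents 'STAY' grid into which each agent's path is scattered
-- column-wise (objective: alternative decomposition, same cost).

-- ===== PORT A =====
def get_action_per_timestep (action_paths : List (String × List String)) : List (List String) :=
  let vals := (PySem.Dict.ofList action_paths).values
  let lengths : List Int := vals.map (fun actions => (actions.length : Int))
  match PySem.List.max? lengths (fun x => x) with
  | none => []   -- Python: max([]) raises ValueError; excluded by Pre_
  | some m =>
      (PySem.List.pyRange 0 m 1).foldl
        (fun actions_list i =>
          actions_list ++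
            [vals.foldl
              (fun joint_action agent_actions =>
                joint_action ++
                  [if i < (agent_actions.length : Int)
                   then PySem.List.pyGetD agent_actions i "STAY"   -- index always in range here
                   else "STAY"]) []])
        []

-- ===== PORT B =====
def get_action_per_timestep_alt (action_paths : List (String × List String)) : List (List String) :=
  let vals := (PySem.Dict.ofList action_paths).values
  match PySem.List.max? (vals.map (fun a => (a.length : Int))) (fun x => x) with
  | none => []   -- Python: max of an empty generator raises ValueError; excluded by Pre_
  | some max_len =>
      let grid := List.replicate max_len.toNat (List.replicate vals.length "STAY")
      (PySem.List.enumerate vals).foldl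
        (fun g p =>
          (PySem.List.enumerate p.2).foldl
            (fun g q => g.set q.1.toNat ((g.getD q.1.toNat []).set p.1.toNat q.2)) g)
        grid

-- ===== PRECONDITION & SPEC =====
-- Pre_ excludes only the empty dict, on which both Pythons raise ValueError (max of an empty sequence).
def Pre_get_action_per_timestep (action_paths : List (String × List String)) : Prop :=
  action_paths ≠ []
instance (action_paths : List (String × List String)) : Decidable (Pre_get_action_per_timestep action_paths) := by unfold Pre_get_action_per_timestep; infer_instance

def pvWitness_get_action_per_timestep : (List (String × List String)) := [("a", ["UP", "DOWN"]), ("b", ["LEFT"])]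

def Spec_get_action_per_timestep (action_paths : List (String × List String)) (out : List (List String)) : Prop := out = get_action_per_timestep_alt action_paths
instance (action_paths : List (String × List String)) (out : List (List String)) : Decidable (Spec_get_action_per_timestep action_paths out) := by unfold Spec_get_action_per_timestep; infer_instance

-- ===== CLAIM (what is proved, stated in full; the proofs are below) =====
def Claim_equal_get_action_per_timestep : Prop := ∀ (action_paths : List (String × List String)), Dom_get_action_per_timestep action_paths → Pre_get_action_per_timestep action_paths → Spec_get_action_per_timestep action_paths (get_action_per_timestep action_paths)

-- ===== LEMMAS AND PROOFS =====

-- the entry B's scattered grid holds at row r after the columns vs (starting at column c) were written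
def wrRow (r : Nat) : List (List String) → Nat → List String → List String
  | [], _, row => row
  | aa :: vs, c, row => wrRow r vs (c + 1) (if r < aa.length then row.set c (aa.getD r "STAY") else row)

-- inner scatter loop of B, characterized row by row
theorem inner_getElem? (aa : List String) (col : Nat) :
    ∀ (k : Nat) (g : List (List String)) (r : Nat),
      ((PySem.List.enumerate aa (k : Int)).foldl
          (fun g q => g.set q.1.toNat ((g.getD q.1.toNat []).set col q.2)) g)[r]?
        = if k ≤ r ∧ r < k + aa.length
            then (g[r]?).map (fun row => row.set col (aa.getD (r - k) "STAY"))
            else g[r]? := by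
  induction aa with
  | nil =>
      intro k g r
      rw [if_neg (by simp only [List.length_nil]; omega)]
      simp [PySem.List.enumerate_nil]
  | cons x aa ih =>
      intro k g r
      rw [PySem.List.enumerate_cons, List.foldl_cons]
      have hcast : (k : Int) + 1 = ((k + 1 : Nat) : Int) := by push_cast; ring
      rw [hcast, ih (k + 1)]
      simp only [Int.toNat_natCast]
      by_cases hr : r = k
      · subst hr
        rw [if_neg (by omega)]
        by_cases hlt : r < g.length
        · rw [if_pos ⟨le_refl r, by simp⟩]
          rw [List.getElem?_set, if_pos rfl, if_pos hlt]
          rw [List.getElem?_eq_getElem hlt]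
          simp [List.getD_eq_getElem?_getD, List.getElem?_eq_getElem hlt]
        · rw [if_pos ⟨le_refl r, by simp⟩]
          rw [List.getElem?_set, if_pos rfl, if_neg hlt]
          rw [List.getElem?_eq_none (by omega)]
          simp
      · have hset : (g.set k ((g.getD k []).set col x))[r]? = g[r]? := by
          rw [List.getElem?_set, if_neg (by omega)]
        rw [hset]
        by_cases hin : k ≤ r ∧ r < k + (x :: aa).length
        · rw [if_pos (by simp at hin ⊢; omega), if_pos hin]
          have : r - k = (r - (k + 1)) + 1 := by omega
          rw [this]
          simp [List.getD]
        · rw [if_neg (by simp at hin ⊢; omega), if_neg hin]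

-- outer scatter loop of B, characterized row by row
theorem outer_getElem? :
    ∀ (vs : List (List String)) (c : Nat) (g : List (List String)) (r : Nat),
      ((PySem.List.enumerate vs (c : Int)).foldl
          (fun g p => (PySem.List.enumerate p.2).foldl
            (fun g q => g.set q.1.toNat ((g.getD q.1.toNat []).set p.1.toNat q.2)) g) g)[r]?
        = (g[r]?).map (wrRow r vs c) := by
  intro vs
  induction vs with
  | nil =>
      intro c g r
      simp [PySem.List.enumerate_nil, wrRow]
  | cons aa vs ih =>
      intro c g r
      rw [PySem.List.enumerate_cons, List.foldl_cons]
      have hcast : (c : Int) + 1 = ((c + 1 : Nat) : Int) := by push_cast; ring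
      rw [hcast, ih (c + 1)]
      have hinner := inner_getElem? aa (((c : Int)).toNat) 0
      simp only [Int.toNat_natCast] at hinner ⊢
      have h0 : PySem.List.enumerate aa = PySem.List.enumerate aa ((0 : Nat) : Int) := rfl
      rw [h0, hinner]
      by_cases hlt : r < aa.length
      · rw [if_pos ⟨Nat.zero_le r, by omega⟩, Option.map_map]
        cases g[r]? with
        | none => rfl
        | some row =>
            simp [wrRow, hlt]
      · rw [if_neg (by omega)]
        cases g[r]? with
        | none => rfl
        | some row =>
            simp only [Option.map_some, wrRow]
            rw [if_neg hlt]

-- the scattered row equals the gathered row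
theorem wrRow_spec :
    ∀ (vs : List (List String)) (pre : List String) (r : Nat),
      wrRow r vs pre.length (pre ++ List.replicate vs.length "STAY")
        = pre ++ vs.map (fun aa => if r < aa.length then aa.getD r "STAY" else "STAY") := by
  intro vs
  induction vs with
  | nil => intro pre r; simp [wrRow]
  | cons aa vs ih =>
      intro pre r
      simp only [List.length_cons, List.replicate_succ, wrRow]
      have hset : ∀ w : String, (pre ++ "STAY" :: List.replicate vs.length "STAY").set pre.length w
          = (pre ++ [w]) ++ List.replicate vs.length "STAY" := by
        intro w
        rw [List.set_append]
        simp
      by_cases hlt : r < aa.length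
      · rw [if_pos hlt, hset]
        have hlen : pre.length + 1 = (pre ++ [aa.getD r "STAY"]).length := by simp
        rw [hlen, ih]
        simp [if_pos hlt]
      · rw [if_neg hlt]
        have : pre ++ "STAY" :: List.replicate vs.length "STAY"
            = (pre ++ ["STAY"]) ++ List.replicate vs.length "STAY" := by simp
        rw [this]
        have hlen : pre.length + 1 = (pre ++ ["STAY"]).length := by simp
        rw [hlen, ih]
        simp [if_neg hlt]

-- ===== VERDICT (by name: the statement is the Claim_ definition above) =====
theorem get_action_per_timestep_spec : Claim_equal_get_action_per_timestep := by
  intro action_paths _ _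
  unfold Spec_get_action_per_timestep get_action_per_timestep get_action_per_timestep_alt
  simp only []
  generalize (PySem.Dict.ofList action_paths).values = vals
  cases hmax : PySem.List.max? (vals.map (fun a => (a.length : Int))) (fun x => x) with
  | none => rfl
  | some m =>
      dsimp only
      apply List.ext_getElem?
      intro r
      -- A side
      rw [PySem.List.foldl_append_singleton_eq_map
            (fun i => vals.foldl (fun joint_action agent_actions =>
              joint_action ++ [if i < (agent_actions.length : Int)
                then PySem.List.pyGetD agent_actions i "STAY" else "STAY"]) [])]
      rw [List.nil_append, List.getElem?_map, PySem.List.getElem?_pyRange_one]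
      -- B side
      have h0 : PySem.List.enumerate vals = PySem.List.enumerate vals ((0 : Nat) : Int) := rfl
      rw [h0, outer_getElem?]
      rw [List.getElem?_replicate]
      by_cases hr : r < m.toNat
      · rw [if_pos (by omega), if_pos hr]
        simp only [Option.map_some]
        congr 1
        have hw := wrRow_spec vals [] r
        simp only [List.length_nil, List.nil_append] at hw
        rw [hw]
        rw [PySem.List.foldl_append_singleton_eq_map
              (fun agent_actions => if (0 : Int) + (r : Int) < (agent_actions.length : Int)
                then PySem.List.pyGetD agent_actions ((0 : Int) + (r : Int)) "STAY" else "STAY")]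
        rw [List.nil_append]
        apply List.map_congr_left
        intro aa _
        have : (0 : Int) + (r : Int) = ((r : Nat) : Int) := by ring
        rw [this, PySem.List.pyGetD_natCast]
        by_cases h : r < aa.length
        · rw [if_pos (by exact_mod_cast h), if_pos h]
        · rw [if_neg (by exact_mod_cast h), if_neg h]
      · rw [if_neg (by omega), if_neg hr]
        rfl
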